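-- pv_equiv track=rewrite | github.com/PRAGA-maker/prorl-on-noma | demo_TTA_MNIST/compare_stream_plot.py | find_phase_changes
-- ===== SOURCE A (Python) =====
-- def find_phase_changes(phases):
--     """Return indices where the phase changes."""
--     markers = []
--     if not phases:
--         return markers
--     prev = phases[0]
--     for idx, p in enumerate(phases[1:], start=1):
--         if p != prev:
--             markers.append((idx, p))
--             prev = p
--     return markers
-- ===== SOURCE B (Python) =====
-- def find_phase_changes(phases):
--     """Return indices where the phase changes (run-length decomposition)."""
--     # Pass 1: run-length encode phases into (value, length) runs.
--     runs = []
--     for p in phases: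
--         if runs and runs[-1][0] == p:
--             runs[-1] = (runs[-1][0], runs[-1][1] + 1)
--         else:
--             runs.append((p, 1))
--     if not runs:
--         return []
--     # Pass 2: each run after the first starts a new phase at the running offset.
--     markers = []
--     offset = runs[0][1]
--     for val, length in runs[1:]:
--         markers.append((offset, val))
--         offset += length
--     return markers
-- ===== Notes on version B (the rewrite author's own statement) =====
-- stated objective: alternative
-- what changed: B first run-length encodes the list into (value, length) runs, then emits one marker per run after the first at the accumulated offset, instead of A's single scan comparing each element with the previous value.
import Mathlib
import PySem

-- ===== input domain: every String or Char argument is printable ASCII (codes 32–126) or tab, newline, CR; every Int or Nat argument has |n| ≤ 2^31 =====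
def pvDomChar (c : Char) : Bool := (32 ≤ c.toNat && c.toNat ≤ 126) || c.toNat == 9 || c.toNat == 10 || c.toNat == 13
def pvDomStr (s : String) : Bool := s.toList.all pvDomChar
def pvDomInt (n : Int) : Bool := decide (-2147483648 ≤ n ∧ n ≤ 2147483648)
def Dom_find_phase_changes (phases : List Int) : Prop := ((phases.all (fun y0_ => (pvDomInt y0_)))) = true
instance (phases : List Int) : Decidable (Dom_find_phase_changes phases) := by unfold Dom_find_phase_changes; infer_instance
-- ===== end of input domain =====

-- B replaces A's element-by-element previous-value scan with a two-pass run-length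
-- encoding and per-run marker emission (objective: alternative decomposition).


-- ===== PORT A =====
-- the 'for idx, p in enumerate(phases[1:], start=1)' loop; markers accumulated by append ≡ cons-building
def pvALoop (prev : Int) (idx : Int) : List Int → List (Int × Int)
  | [] => []
  | p :: ps => if p ≠ prev then (idx, p) :: pvALoop p (idx + 1) ps else pvALoop prev (idx + 1) ps

def find_phase_changes (phases : List Int) : List (Int × Int) :=
  match phases with
  | [] => []
  | p0 :: rest => pvALoop p0 1 rest

-- ===== PORT B =====
-- pass 1 of Source B: runs are built by foldl; the Python list's mutable last element is the
-- head of the reversed accumulator, reversed back at the end — exact.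
def pvStep (racc : List (Int × Int)) (p : Int) : List (Int × Int) :=
  match racc with
  | (v, c) :: rest => if v = p then (v, c + 1) :: rest else (p, 1) :: (v, c) :: rest
  | [] => [(p, 1)]

-- pass 2 of Source B: 'for val, length in runs[1:]' with the running offset
def pvEmit (offset : Int) : List (Int × Int) → List (Int × Int)
  | [] => []
  | (v, c) :: rs => (offset, v) :: pvEmit (offset + c) rs

def find_phase_changes_alt (phases : List Int) : List (Int × Int) :=
  let runs := (phases.foldl pvStep []).reverse
  match runs with
  | [] => []
  | (_, c0) :: rs => pvEmit c0 rs

-- ===== PRECONDITION & SPEC =====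
def Spec_find_phase_changes (phases : List Int) (out : List (Int × Int)) : Prop := out = find_phase_changes_alt phases
instance (phases : List Int) (out : List (Int × Int)) : Decidable (Spec_find_phase_changes phases out) := by unfold Spec_find_phase_changes; infer_instance

-- ===== CLAIM (what is proved, stated in full; the proofs are below) =====
def Claim_equal_find_phase_changes : Prop := ∀ (phases : List Int), Dom_find_phase_changes phases → Spec_find_phase_changes phases (find_phase_changes phases)

-- ===== LEMMAS AND PROOFS =====

-- forward characterisation of the run-length encoding
def pvRunsFrom (v : Int) (c : Int) : List Int → List (Int × Int)
  | [] => [(v, c)]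
  | p :: ps => if v = p then pvRunsFrom v (c + 1) ps else (v, c) :: pvRunsFrom p 1 ps

theorem pvFoldl_step (l : List Int) : ∀ (v c : Int) (r : List (Int × Int)),
    (l.foldl pvStep ((v, c) :: r)).reverse = r.reverse ++ pvRunsFrom v c l := by
  induction l with
  | nil => intro v c r; simp [pvRunsFrom]
  | cons p ps ih =>
    intro v c r
    by_cases h : v = p
    · simp [List.foldl, pvStep, pvRunsFrom, h, ih]
    · simp [List.foldl, pvStep, pvRunsFrom, h, ih]

theorem pvEmit_runs (ps : List Int) : ∀ (v c off : Int),
    pvEmit off (pvRunsFrom v c ps) = (off, v) :: pvALoop v (off + c) ps := by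
  induction ps with
  | nil => intro v c off; simp [pvRunsFrom, pvEmit, pvALoop]
  | cons p ps' ih =>
    intro v c off
    by_cases h : v = p
    · subst h
      simp [pvRunsFrom, pvALoop, ih, add_assoc]
    · simp [pvRunsFrom, pvEmit, pvALoop, h, Ne.symm h, ih, add_assoc]

theorem pvMain (rest : List Int) : ∀ (v c : Int),
    (match pvRunsFrom v c rest with
      | [] => ([] : List (Int × Int))
      | (_, c0) :: rs => pvEmit c0 rs) = pvALoop v c rest := by
  induction rest with
  | nil => intro v c; simp [pvRunsFrom, pvEmit, pvALoop]
  | cons p ps ih =>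
    intro v c
    by_cases h : v = p
    · subst h
      simpa [pvRunsFrom, pvALoop] using ih v (c + 1)
    · simp [pvRunsFrom, pvALoop, h, Ne.symm h, pvEmit_runs]

-- ===== VERDICT (by name: the statement is the Claim_ definition above) =====
theorem find_phase_changes_spec : Claim_equal_find_phase_changes := by
  intro phases _
  unfold Spec_find_phase_changes find_phase_changes find_phase_changes_alt
  cases phases with
  | nil => simp
  | cons p0 rest =>
    have h : ((p0 :: rest).foldl pvStep []).reverse = pvRunsFrom p0 1 rest := by
      simpa [pvStep] using pvFoldl_step rest p0 1 []
    simp only [h]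
    exact (pvMain rest p0 1).symm
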